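-- pv_equiv track=rewrite | github.com/sabbiracoustic1006/E25 | ensemble_majority_vote_custom_tag.py | custom_majority_vote
-- ===== SOURCE A (Python) =====
-- from collections import Counter
-- from typing import List, Tuple, Iterable
--
-- Record = Tuple[int, str, str, str]
--
-- def custom_majority_vote(
--     records: Iterable[List[Record]],
--     min_votes: int,
--     boost: int,
--     target_tag: str
-- ) -> List[Record]:
--     """
--     Perform majority vote with custom threshold for specific tag.
--
--     Args:
--         records: Iterable of record lists from each submission
--         min_votes: Minimum votes required for most tags
--         boost: Additional votes required for target tag
--         target_tag: The tag to apply boost to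
--
--     Returns:
--         List of records that meet the threshold
--     """
--     counter: Counter[Record] = Counter()
--
--     # Count occurrences of each prediction
--     for record_list in records:
--         counter.update(record_list)
--
--     # Apply different thresholds based on aspect
--     majority_records = []
--     for record, count in counter.items():
--         aspect = record[2]  # aspect is at index 2
--
--         if aspect == target_tag:
--             # Custom threshold for target tag
--             if count >= (min_votes + boost):
--                 majority_records.append(record)
--         else:
--             # Regular threshold for other tags
--             if count >= min_votes:
--                 majority_records.append(record)
--
--     # Sort by record_id, category, aspect, value
--     majority_records.sort(key=lambda item: (item[0], item[1], item[2], item[3]))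
--
--     return majority_records
-- ===== SOURCE B (Python) =====
-- def custom_majority_vote(records, min_votes, boost, target_tag):
--     """Sort-then-scan: flatten, sort, count each run of identical records, keep by threshold."""
--     ordered = sorted(r for record_list in records for r in record_list)
--     result = []
--     i, n = 0, len(ordered)
--     while i < n:
--         record = ordered[i]
--         j = i
--         while j < n and ordered[j] == record:
--             j += 1
--         needed = min_votes + boost if record[2] == target_tag else min_votes
--         if j - i >= needed:
--             result.append(record)
--         i = j
--     return result
-- ===== Notes on version B (the rewrite author's own statement) =====
-- stated objective: alternative
-- what changed: Replaces A's Counter-dict accumulation followed by a filter pass and a final sort with a single sort of the flattened records and one linear scan that counts adjacent runs of identical records and keeps those meeting their tag's threshold, emitting the output already in sorted order.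
import Mathlib
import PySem

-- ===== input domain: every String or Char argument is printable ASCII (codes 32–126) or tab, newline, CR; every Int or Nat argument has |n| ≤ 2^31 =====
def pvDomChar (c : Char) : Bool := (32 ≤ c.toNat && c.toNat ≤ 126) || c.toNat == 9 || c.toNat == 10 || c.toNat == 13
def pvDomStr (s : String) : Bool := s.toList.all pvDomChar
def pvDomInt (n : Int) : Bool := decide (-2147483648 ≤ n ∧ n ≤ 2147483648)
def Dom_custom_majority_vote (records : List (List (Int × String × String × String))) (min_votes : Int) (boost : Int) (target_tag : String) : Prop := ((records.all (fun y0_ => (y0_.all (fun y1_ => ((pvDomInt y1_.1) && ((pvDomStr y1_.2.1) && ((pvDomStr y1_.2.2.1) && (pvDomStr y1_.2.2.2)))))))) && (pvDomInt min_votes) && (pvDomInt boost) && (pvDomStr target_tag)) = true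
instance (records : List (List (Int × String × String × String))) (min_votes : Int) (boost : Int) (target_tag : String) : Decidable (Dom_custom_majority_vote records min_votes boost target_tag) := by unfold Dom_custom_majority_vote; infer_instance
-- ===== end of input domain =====

-- B replaces A's Counter-then-filter-then-sort with a single sort of the flattened records
-- followed by one scan counting adjacent runs (same results; a different algorithm, not faster).

-- Python compares the 4-tuples lexicographically; pvKey is that order (Prod.Lex nesting),
-- shared by both ports (A's sort key (item[0],item[1],item[2],item[3]) IS the whole tuple).
def pvKey (r : Int × String × String × String) : Int ×ₗ (String ×ₗ (String ×ₗ String)) :=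
  toLex (r.1, toLex (r.2.1, toLex (r.2.2.1, r.2.2.2)))

-- ===== PORT A =====
def custom_majority_vote (records : List (List (Int × String × String × String))) (min_votes : Int) (boost : Int) (target_tag : String) : List (Int × String × String × String) :=
  -- counter = Counter(); for record_list in records: counter.update(record_list)
  let counter : PySem.Dict (Int × String × String × String) Int :=
    records.foldl (fun c record_list => record_list.foldl (fun d x => d.modify x 0 (· + 1)) c) PySem.Dict.empty
  -- for record, count in counter.items(): … append by threshold
  let majority_records : List (Int × String × String × String) :=
    counter.items.foldl (fun acc rc =>
      let aspect := rc.1.2.2.1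
      if aspect == target_tag then
        if rc.2 ≥ min_votes + boost then acc ++ [rc.1] else acc
      else
        if rc.2 ≥ min_votes then acc ++ [rc.1] else acc) []
  -- majority_records.sort(key=lambda item: (item[0], item[1], item[2], item[3]))
  PySem.List.sorted majority_records pvKey false

-- ===== PORT B =====
-- the inner 'while j < n and ordered[j] == record: j += 1' run scan: each step emits
-- (record, run length) and continues after the run.
def pvRuns (l : List (Int × String × String × String)) : List ((Int × String × String × String) × Int) :=
  match l with
  | [] => []
  | x :: xs => (x, 1 + ((xs.takeWhile (· == x)).length : Int)) :: pvRuns (xs.dropWhile (· == x))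
termination_by l.length
decreasing_by simpa using Nat.lt_succ_of_le (List.length_dropWhile_le (· == x) xs)

def custom_majority_vote_alt (records : List (List (Int × String × String × String))) (min_votes : Int) (boost : Int) (target_tag : String) : List (Int × String × String × String) :=
  -- ordered = sorted(r for record_list in records for r in record_list)  (tuple order = pvKey)
  let ordered := PySem.List.sorted records.flatten pvKey false
  -- walk the runs of equal records in order, keep those meeting the tag's threshold
  (pvRuns ordered).foldl (fun result rn =>
    let needed := if rn.1.2.2.1 == target_tag then min_votes + boost else min_votes
    if rn.2 ≥ needed then result ++ [rn.1] else result) []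

-- ===== PRECONDITION & SPEC =====
def Spec_custom_majority_vote (records : List (List (Int × String × String × String))) (min_votes : Int) (boost : Int) (target_tag : String) (out : List (Int × String × String × String)) : Prop := out = custom_majority_vote_alt records min_votes boost target_tag
instance (records : List (List (Int × String × String × String))) (min_votes : Int) (boost : Int) (target_tag : String) (out : List (Int × String × String × String)) : Decidable (Spec_custom_majority_vote records min_votes boost target_tag out) := by unfold Spec_custom_majority_vote; infer_instance

-- ===== CLAIM (what is proved, stated in full; the proofs are below) =====
def Claim_equal_custom_majority_vote : Prop := ∀ (records : List (List (Int × String × String × String))) (min_votes : Int) (boost : Int) (target_tag : String), Dom_custom_majority_vote records min_votes boost target_tag → Spec_custom_majority_vote records min_votes boost target_tag (custom_majority_vote records min_votes boost target_tag)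

-- ===== LEMMAS AND PROOFS =====

-- the common "kept" predicate: record r with multiplicity (F.count r) meets its threshold
def pvKeep (min_votes boost : Int) (target_tag : String) (F : List (Int × String × String × String)) (r : Int × String × String × String) : Bool :=
  if r.2.2.1 == target_tag then decide ((F.count r : Int) ≥ min_votes + boost)
  else decide ((F.count r : Int) ≥ min_votes)

lemma pvKey_injective : Function.Injective pvKey := by
  intro a b h
  obtain ⟨a1, a2, a3, a4⟩ := a; obtain ⟨b1, b2, b3, b4⟩ := b
  simpa [pvKey, Prod.ext_iff] using h

-- A unfolds to: sort the kept elements of the deduplicated flatten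
lemma portA_eq (records : List (List (Int × String × String × String))) (min_votes boost : Int) (target_tag : String) :
    custom_majority_vote records min_votes boost target_tag
      = PySem.List.sorted ((PySem.Set.ofList records.flatten).filter
          (pvKeep min_votes boost target_tag records.flatten)) pvKey false := by
  simp only [custom_majority_vote]
  have hcnt : (records.foldl (fun c record_list => record_list.foldl (fun d x => d.modify x 0 (· + 1)) c) PySem.Dict.empty)
      = PySem.Dict.counter records.flatten := by
    rw [PySem.Dict.counter_eq_foldl]
    exact List.foldl_flatten.symm
  rw [hcnt, PySem.Dict.items_counter]
  have hbody : (fun acc (rc : (Int × String × String × String) × Int) =>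
      if rc.1.2.2.1 == target_tag then
        if rc.2 ≥ min_votes + boost then acc ++ [rc.1] else acc
      else
        if rc.2 ≥ min_votes then acc ++ [rc.1] else acc)
      = (fun acc rc =>
          if (if rc.1.2.2.1 == target_tag then decide (rc.2 ≥ min_votes + boost)
              else decide (rc.2 ≥ min_votes)) then acc ++ [rc.1] else acc) := by
    funext acc rc
    by_cases h : rc.1.2.2.1 == target_tag <;> simp [h]
  rw [hbody, PySem.List.foldl_append_if]
  simp only [List.nil_append]
  rw [List.filter_map, List.map_map]
  congr 1
  have hid : (Prod.fst ∘ fun k : Int × String × String × String => (k, (records.flatten.count k : Int))) = id := by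
    funext k; rfl
  rw [hid, List.map_id]
  exact List.filter_congr (fun r _ => rfl)

-- ---- run-scan facts, on a list sorted by pvKey ----

lemma takeWhile_mem_eq {x y : Int × String × String × String} {xs : List (Int × String × String × String)}
    (h : y ∈ xs.takeWhile (· == x)) : y = x := by
  have := List.mem_takeWhile_imp h
  simpa using this

lemma not_mem_dropWhile {x : Int × String × String × String} {xs : List (Int × String × String × String)}
    (hall : ∀ y ∈ xs, pvKey x ≤ pvKey y) (hp : xs.Pairwise (fun a b => pvKey a ≤ pvKey b)) :
    x ∉ xs.dropWhile (· == x) := by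
  induction xs with
  | nil => simp
  | cons z zs ih =>
    rcases List.pairwise_cons.mp hp with ⟨hz_le, hzs⟩
    by_cases hz : (z == x) = true
    · rw [List.dropWhile_cons, if_pos hz]
      exact ih (fun y hy => hall y (List.mem_cons_of_mem _ hy)) hzs
    · rw [List.dropWhile_cons, if_neg hz]
      intro hmem
      have hxz : x = z := by
        rcases List.mem_cons.mp hmem with h | h
        · exact h
        · have h1 : pvKey x ≤ pvKey z := hall z List.mem_cons_self
          have h2 : pvKey z ≤ pvKey x := hz_le x h
          exact pvKey_injective (le_antisymm h1 h2)
      exact hz (by simp [hxz])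

-- count of the head of a key-sorted list = 1 + its run length
lemma count_head_sorted {x : Int × String × String × String} {xs : List (Int × String × String × String)}
    (hall : ∀ y ∈ xs, pvKey x ≤ pvKey y) (hp : xs.Pairwise (fun a b => pvKey a ≤ pvKey b)) :
    (x :: xs).count x = 1 + (xs.takeWhile (· == x)).length := by
  have hsplit : xs.takeWhile (· == x) ++ xs.dropWhile (· == x) = xs := List.takeWhile_append_dropWhile
  have ht : (xs.takeWhile (· == x)).count x = (xs.takeWhile (· == x)).length :=
    List.count_eq_length.mpr (fun b hb => (takeWhile_mem_eq hb).symm)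
  have hd : (xs.dropWhile (· == x)).count x = 0 :=
    List.count_eq_zero.mpr (not_mem_dropWhile hall hp)
  calc (x :: xs).count x = xs.count x + 1 := List.count_cons_self ..
    _ = ((xs.takeWhile (· == x)) ++ (xs.dropWhile (· == x))).count x + 1 := by rw [hsplit]
    _ = 1 + (xs.takeWhile (· == x)).length := by
        rw [List.count_append, ht, hd]; omega

-- elements after the head's run keep their multiplicity
lemma count_tail_sorted {x r : Int × String × String × String} {xs : List (Int × String × String × String)}
    (hall : ∀ y ∈ xs, pvKey x ≤ pvKey y) (hp : xs.Pairwise (fun a b => pvKey a ≤ pvKey b))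
    (hr : r ∈ xs.dropWhile (· == x)) :
    (x :: xs).count r = (xs.dropWhile (· == x)).count r := by
  have hrx : r ≠ x := fun h => not_mem_dropWhile hall hp (h ▸ hr)
  have hsplit : xs.takeWhile (· == x) ++ xs.dropWhile (· == x) = xs := List.takeWhile_append_dropWhile
  have ht : (xs.takeWhile (· == x)).count r = 0 :=
    List.count_eq_zero.mpr (fun hmem => hrx (takeWhile_mem_eq hmem))
  have h1 : (x :: xs).count r = xs.count r := by
    rw [List.count_cons]
    simp [Ne.symm hrx]
  rw [h1]
  conv_lhs => rw [← hsplit]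
  rw [List.count_append, ht]
  omega

lemma pvRuns_fst_mem : ∀ (l : List (Int × String × String × String)) (r : Int × String × String × String),
    r ∈ (pvRuns l).map Prod.fst ↔ r ∈ l := by
  intro l
  induction l using pvRuns.induct with
  | case1 => simp [pvRuns]
  | case2 x xs ih =>
    intro r
    rw [pvRuns]
    simp only [List.map_cons, List.mem_cons, ih]
    constructor
    · rintro (rfl | h)
      · exact Or.inl rfl
      · exact Or.inr ((List.dropWhile_sublist _).mem h)
    · rintro (rfl | h)
      · exact Or.inl rfl
      · rw [← List.takeWhile_append_dropWhile (p := (· == x)) (l := xs)] at h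
        rcases List.mem_append.mp h with h | h
        · exact Or.inl (takeWhile_mem_eq h)
        · exact Or.inr h

lemma pvRuns_count : ∀ (l : List (Int × String × String × String)),
    l.Pairwise (fun a b => pvKey a ≤ pvKey b) →
    ∀ rn ∈ pvRuns l, rn.2 = (l.count rn.1 : Int) := by
  intro l
  induction l using pvRuns.induct with
  | case1 => simp [pvRuns]
  | case2 x xs ih =>
    intro hp rn hm
    rcases List.pairwise_cons.mp hp with ⟨hall, hxs⟩
    have hpd : (xs.dropWhile (· == x)).Pairwise (fun a b => pvKey a ≤ pvKey b) :=
      hxs.sublist (List.dropWhile_sublist _)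
    rw [pvRuns] at hm
    rcases List.mem_cons.mp hm with rfl | hm
    · simp only
      rw [count_head_sorted hall hxs]
      push_cast; ring
    · have hmem : rn.1 ∈ xs.dropWhile (· == x) :=
        (pvRuns_fst_mem _ rn.1).mp (List.mem_map_of_mem hm)
      rw [ih hpd rn hm, count_tail_sorted hall hxs hmem]

lemma pvRuns_fst_pairwise : ∀ (l : List (Int × String × String × String)),
    l.Pairwise (fun a b => pvKey a ≤ pvKey b) →
    ((pvRuns l).map Prod.fst).Pairwise (fun a b => pvKey a < pvKey b) := by
  intro l
  induction l using pvRuns.induct with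
  | case1 => simp [pvRuns]
  | case2 x xs ih =>
    intro hp
    rcases List.pairwise_cons.mp hp with ⟨hall, hxs⟩
    have hpd : (xs.dropWhile (· == x)).Pairwise (fun a b => pvKey a ≤ pvKey b) :=
      hxs.sublist (List.dropWhile_sublist _)
    rw [pvRuns]
    simp only [List.map_cons]
    refine List.pairwise_cons.mpr ⟨?_, ih hpd⟩
    intro r hr
    have hrd : r ∈ xs.dropWhile (· == x) := (pvRuns_fst_mem _ r).mp hr
    have hle : pvKey x ≤ pvKey r := hall r ((List.dropWhile_sublist _).mem hrd)
    have hne : r ≠ x := fun h => not_mem_dropWhile hall hxs (h ▸ hrd)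
    exact lt_of_le_of_ne hle (fun h => hne (pvKey_injective h).symm)

-- B unfolds to the same filtered dedup, sorted
lemma portB_eq (records : List (List (Int × String × String × String))) (min_votes boost : Int) (target_tag : String) :
    custom_majority_vote_alt records min_votes boost target_tag
      = PySem.List.sorted ((PySem.Set.ofList records.flatten).filter
          (pvKeep min_votes boost target_tag records.flatten)) pvKey false := by
  simp only [custom_majority_vote_alt]
  set F := records.flatten with hF
  set S := PySem.List.sorted F pvKey false with hS
  have hSp : S.Pairwise (fun a b => pvKey a ≤ pvKey b) := PySem.List.sorted_pairwise ..
  have hSperm : S.Perm F := PySem.List.sorted_perm ..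
  -- the fold is a filter+map over the runs
  have hbody : (fun result (rn : (Int × String × String × String) × Int) =>
      if rn.2 ≥ (if rn.1.2.2.1 == target_tag then min_votes + boost else min_votes)
      then result ++ [rn.1] else result)
      = (fun result rn =>
          if (if rn.1.2.2.1 == target_tag then decide (rn.2 ≥ min_votes + boost)
              else decide (rn.2 ≥ min_votes)) then result ++ [rn.1] else result) := by
    funext result rn
    by_cases h : rn.1.2.2.1 == target_tag <;> simp [h]
  rw [hbody, PySem.List.foldl_append_if]
  simp only [List.nil_append]
  -- the run multiplicities are the counts in F, so the test is pvKeep of the head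
  rw [List.filter_congr (q := (pvKeep min_votes boost target_tag F) ∘ Prod.fst)
        (fun rn hm => by
          have hc : rn.2 = (S.count rn.1 : Int) := pvRuns_count S hSp rn hm
          have hc2 : S.count rn.1 = F.count rn.1 := hSperm.count_eq rn.1
          simp only [Function.comp_apply, pvKeep, hc, hc2])]
  rw [← List.filter_map]
  -- name ys := the filtered run heads; show it is the sorted filtered dedup
  set ys := ((pvRuns S).map Prod.fst).filter (pvKeep min_votes boost target_tag F) with hys
  have hlt : ((pvRuns S).map Prod.fst).Pairwise (fun a b => pvKey a < pvKey b) :=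
    pvRuns_fst_pairwise S hSp
  have hys_lt : ys.Pairwise (fun a b => pvKey a < pvKey b) := hlt.sublist List.filter_sublist
  have hys_nd : ys.Nodup :=
    hys_lt.imp (fun {a b} h => fun he => absurd (he ▸ h) (lt_irrefl _))
  have hxs_nd : ((PySem.Set.ofList F).filter (pvKeep min_votes boost target_tag F)).Nodup :=
    (PySem.Set.nodup_ofList F).filter _
  have hmem : ∀ r, r ∈ ys ↔ r ∈ (PySem.Set.ofList F).filter (pvKeep min_votes boost target_tag F) := by
    intro r
    simp only [hys, List.mem_filter, pvRuns_fst_mem]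
    constructor
    · rintro ⟨h1, h2⟩
      exact ⟨(PySem.Set.mem_ofList ..).mpr (hSperm.mem_iff.mp h1), h2⟩
    · rintro ⟨h1, h2⟩
      exact ⟨hSperm.mem_iff.mpr ((PySem.Set.mem_ofList ..).mp h1), h2⟩
  have hperm : ys.Perm ((PySem.Set.ofList F).filter (pvKeep min_votes boost target_tag F)) :=
    (List.perm_ext_iff_of_nodup hys_nd hxs_nd).mpr hmem
  exact (PySem.List.sorted_eq_of_perm_of_pairwise_lt _ _ _ hperm hys_lt).symm

-- ===== VERDICT (by name: the statement is the Claim_ definition above) =====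
theorem custom_majority_vote_spec : Claim_equal_custom_majority_vote := by
  intro records min_votes boost target_tag _
  unfold Spec_custom_majority_vote
  rw [portA_eq, portB_eq]
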